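-- pv_equiv track=rewrite | github.com/master-pd/Red-mode | methods/method_08_cookies.py | security_analysis
-- ===== SOURCE A (Python) =====
-- def security_analysis(cookies):
--     """সিকিউরিটি অ্যানালাইসিস"""
--     security = {
--         'secure_cookies': 0,
--         'http_only_cookies': 0,
--         'same_site_cookies': 0,
--         'insecure_cookies': 0
--     }
--
--     for cookie in cookies:
--         if cookie.get('secure'):
--             security['secure_cookies'] += 1
--         else:
--             security['insecure_cookies'] += 1
--
--         if cookie.get('http_only'):
--             security['http_only_cookies'] += 1
--
--         if 'same_site' in cookie:
--             security['same_site_cookies'] += 1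
--
--     return security
-- ===== SOURCE B (Python) =====
-- def security_analysis(cookies):
--     """সিকিউরিটি অ্যানালাইসিস"""
--     L = list(cookies)
--     return {
--         'secure_cookies': sum(1 for c in L if c.get('secure')),
--         'http_only_cookies': sum(1 for c in L if c.get('http_only')),
--         'same_site_cookies': sum(1 for c in L if 'same_site' in c),
--         'insecure_cookies': sum(1 for c in L if not c.get('secure')),
--     }
-- ===== Notes on version B (the rewrite author's own statement) =====
-- stated objective: idiomatic
-- what changed: Replaces the single mutating-counter loop with four independent sum-of-generator passes over the materialized cookie list, assembled into the dict literal in one expression.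
import Mathlib
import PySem

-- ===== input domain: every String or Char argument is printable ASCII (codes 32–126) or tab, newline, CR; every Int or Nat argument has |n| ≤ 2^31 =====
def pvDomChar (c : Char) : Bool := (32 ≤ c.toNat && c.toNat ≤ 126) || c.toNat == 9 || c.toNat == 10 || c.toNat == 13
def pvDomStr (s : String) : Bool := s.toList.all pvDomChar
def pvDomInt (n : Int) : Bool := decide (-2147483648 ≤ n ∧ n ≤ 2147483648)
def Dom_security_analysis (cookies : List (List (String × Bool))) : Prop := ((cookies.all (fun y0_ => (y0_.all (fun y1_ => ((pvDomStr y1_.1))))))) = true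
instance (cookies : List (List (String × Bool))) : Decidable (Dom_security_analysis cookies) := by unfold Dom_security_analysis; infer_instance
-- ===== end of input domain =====

-- B computes each of the four counters with its own pass over the materialized cookie list
-- instead of A's single loop mutating a counter dict; same result, idiomatic decomposition.

-- ===== PORT A =====
def saStep (security : PySem.Dict String Int) (cookie : List (String × Bool)) : PySem.Dict String Int :=
  let c := PySem.Dict.ofList cookie
  let security := if c.getD "secure" false then security.modify "secure_cookies" 0 (· + 1)
                  else security.modify "insecure_cookies" 0 (· + 1)
  let security := if c.getD "http_only" false then security.modify "http_only_cookies" 0 (· + 1)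
                  else security
  if c.contains "same_site" then security.modify "same_site_cookies" 0 (· + 1) else security

def security_analysis (cookies : List (List (String × Bool))) : List (String × Int) :=
  (cookies.foldl saStep
    (PySem.Dict.ofList [("secure_cookies", 0), ("http_only_cookies", 0),
                        ("same_site_cookies", 0), ("insecure_cookies", 0)])).items

-- ===== PORT B =====
def security_analysis_alt (cookies : List (List (String × Bool))) : List (String × Int) :=
  let L := cookies.map PySem.Dict.ofList
  [("secure_cookies", (L.countP (fun c => c.getD "secure" false) : Int)),
   ("http_only_cookies", (L.countP (fun c => c.getD "http_only" false) : Int)),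
   ("same_site_cookies", (L.countP (fun c => c.contains "same_site") : Int)),
   ("insecure_cookies", (L.countP (fun c => !c.getD "secure" false) : Int))]

-- ===== PRECONDITION & SPEC =====
def Spec_security_analysis (cookies : List (List (String × Bool))) (out : List (String × Int)) : Prop := out = security_analysis_alt cookies
instance (cookies : List (List (String × Bool))) (out : List (String × Int)) : Decidable (Spec_security_analysis cookies out) := by unfold Spec_security_analysis; infer_instance

-- ===== CLAIM (what is proved, stated in full; the proofs are below) =====
def Claim_equal_security_analysis : Prop := ∀ (cookies : List (List (String × Bool))), Dom_security_analysis cookies → Spec_security_analysis cookies (security_analysis cookies)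

-- ===== LEMMAS AND PROOFS =====

-- ===== VERDICT (by name: the statement is the Claim_ definition above) =====
-- the literal 4-key counter dict A maintains
def mk4 (s h m i : Int) : PySem.Dict String Int :=
  PySem.Dict.mk [("secure_cookies", s), ("http_only_cookies", h),
                 ("same_site_cookies", m), ("insecure_cookies", i)]

theorem saStep_mk4 (s h m i : Int) (c : List (String × Bool)) :
    saStep (mk4 s h m i) c =
      mk4 (s + if (PySem.Dict.ofList c).getD "secure" false then 1 else 0)
          (h + if (PySem.Dict.ofList c).getD "http_only" false then 1 else 0)
          (m + if (PySem.Dict.ofList c).contains "same_site" then 1 else 0)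
          (i + if !(PySem.Dict.ofList c).getD "secure" false then 1 else 0) := by
  simp only [saStep, mk4]
  split_ifs <;> simp_all <;> rfl

theorem fold_mk4 (cs : List (List (String × Bool))) (s h m i : Int) :
    cs.foldl saStep (mk4 s h m i) =
      mk4 (s + ((cs.map PySem.Dict.ofList).countP (fun c => c.getD "secure" false) : Int))
          (h + ((cs.map PySem.Dict.ofList).countP (fun c => c.getD "http_only" false) : Int))
          (m + ((cs.map PySem.Dict.ofList).countP (fun c => c.contains "same_site") : Int))
          (i + ((cs.map PySem.Dict.ofList).countP (fun c => !c.getD "secure" false) : Int)) := by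
  induction cs generalizing s h m i with
  | nil => simp
  | cons c cs ih =>
    simp only [List.foldl_cons, saStep_mk4, ih, List.map_cons, List.countP_cons]
    simp only [mk4, PySem.Dict.mk.injEq, List.cons.injEq, Prod.mk.injEq, and_true, true_and]
    refine ⟨?_, ?_, ?_, ?_⟩ <;> split_ifs <;> simp_all <;> push_cast <;> ring

theorem security_analysis_spec : Claim_equal_security_analysis := by
  intro cookies _
  unfold Spec_security_analysis security_analysis security_analysis_alt
  have : PySem.Dict.ofList [("secure_cookies", (0:Int)), ("http_only_cookies", 0),
          ("same_site_cookies", 0), ("insecure_cookies", 0)] = mk4 0 0 0 0 := by decide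
  rw [this, fold_mk4]
  simp [mk4]
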